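-- pv_equiv track=rewrite | github.com/ghulamfatima123/coding-challenges | General-Programming-and-Algorithms/checkPalindromeString.py | solution
-- ===== SOURCE A (Python) =====
-- def solution(input_string):
--     filtered_result=''
--     rev_str=''
--     for i in input_string:
--         if 'a' <= i <= 'z' or 'A' <= i <= 'Z':
--             if 'a' <= i <= 'z':
--                 filtered_result+= chr(ord(i)-32)
--             else:
--                 filtered_result+=i
--     for i in range(len(filtered_result)-1,-1,-1):
--         rev_str+=filtered_result[i]
--
--     if filtered_result==rev_str:
--         return True
--
--     return False
-- ===== SOURCE B (Python) =====
-- def solution(input_string):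
--     f = [c.upper() for c in input_string if c.isalpha()]
--     lo, hi = 0, len(f) - 1
--     while lo < hi:
--         if f[lo] != f[hi]:
--             return False
--         lo += 1
--         hi -= 1
--     return True
-- ===== Notes on version B (the rewrite author's own statement) =====
-- stated objective: faster
-- what changed: B filters/uppercases once, then checks the palindrome with two inward-moving indices that short-circuit on the first mismatch, instead of building the filtered string and a reversed copy by repeated string concatenation and comparing whole strings.
import Mathlib
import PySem

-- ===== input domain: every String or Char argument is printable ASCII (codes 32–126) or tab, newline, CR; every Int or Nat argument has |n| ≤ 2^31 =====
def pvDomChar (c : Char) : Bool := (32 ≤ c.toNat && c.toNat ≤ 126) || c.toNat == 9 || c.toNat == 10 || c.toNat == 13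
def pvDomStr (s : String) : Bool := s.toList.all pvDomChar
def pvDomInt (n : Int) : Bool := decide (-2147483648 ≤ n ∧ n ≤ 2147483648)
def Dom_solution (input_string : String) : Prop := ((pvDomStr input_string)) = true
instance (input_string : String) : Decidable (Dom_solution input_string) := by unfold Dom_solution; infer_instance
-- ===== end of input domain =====

-- B replaces A's build-reversed-copy-and-compare with a short-circuiting two-pointer scan (alternative decomposition).
-- Python strings are ported as List Char; string '+=' becomes 'acc ++ [c]'.

-- ===== PORT A =====
def solution (input_string : String) : Bool :=
  let filtered_result : List Char := input_string.toList.foldl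
    (fun acc i =>
      if ('a' ≤ i ∧ i ≤ 'z') ∨ ('A' ≤ i ∧ i ≤ 'Z') then
        (if 'a' ≤ i ∧ i ≤ 'z' then acc ++ [Char.ofNat (i.toNat - 32)] else acc ++ [i])
      else acc) []
  let rev_str : List Char := (PySem.List.pyRange ((filtered_result.length : Int) - 1) (-1) (-1)).foldl
    (fun acc i => acc ++ [PySem.List.pyGetD filtered_result i ' ']) []
  if filtered_result = rev_str then true else false

-- ===== PORT B =====
-- the while loop of Source B: two indices moving inward
def pal2 (f : List Char) (lo hi : Int) : Bool :=
  if lo < hi then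
    if PySem.List.pyGetD f lo ' ' ≠ PySem.List.pyGetD f hi ' ' then false
    else pal2 f (lo + 1) (hi - 1)
  else true
termination_by (hi - lo).toNat
decreasing_by omega

def solution_alt (input_string : String) : Bool :=
  let f : List Char := (input_string.toList.filter PySem.Chars.isalpha).map PySem.Chars.upperChar
  pal2 f 0 ((f.length : Int) - 1)

-- ===== PRECONDITION & SPEC =====
def Spec_solution (input_string : String) (out : Bool) : Prop := out = solution_alt input_string
instance (input_string : String) (out : Bool) : Decidable (Spec_solution input_string out) := by unfold Spec_solution; infer_instance

-- ===== CLAIM (what is proved, stated in full; the proofs are below) =====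
def Claim_equal_solution : Prop := ∀ (input_string : String), Dom_solution input_string → Spec_solution input_string (solution input_string)

-- ===== LEMMAS AND PROOFS =====

-- A's filter loop produces exactly B's filtered/uppercased list
lemma filterA_eq (l acc : List Char) :
    l.foldl
      (fun acc i =>
        if ('a' ≤ i ∧ i ≤ 'z') ∨ ('A' ≤ i ∧ i ≤ 'Z') then
          (if 'a' ≤ i ∧ i ≤ 'z' then acc ++ [Char.ofNat (i.toNat - 32)] else acc ++ [i])
        else acc) acc
    = acc ++ (l.filter PySem.Chars.isalpha).map PySem.Chars.upperChar := by
  induction l generalizing acc with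
  | nil => simp
  | cons c l ih =>
    simp only [List.foldl_cons, List.filter_cons]
    by_cases h1 : 'a' ≤ c <;> by_cases h2 : c ≤ 'z' <;> by_cases h3 : 'A' ≤ c <;> by_cases h4 : c ≤ 'Z' <;>
      simp [PySem.Chars.isalpha, PySem.Chars.islower, PySem.Chars.isupper, PySem.Chars.upperChar,
        h1, h2, h3, h4, ih]

-- A's reversing loop produces the reverse of the filtered list
lemma revA_eq (f : List Char) :
    (PySem.List.pyRange ((f.length : Int) - 1) (-1) (-1)).foldl
      (fun acc i => acc ++ [PySem.List.pyGetD f i ' ']) [] = f.reverse := by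
  rw [PySem.List.pyRange_neg_one, List.foldl_map, PySem.List.foldl_append_singleton_eq_map]
  have hn : (((f.length : Int) - 1) - (-1)).toNat = f.length := by omega
  rw [hn]
  apply List.ext_getElem (by simp)
  intro i h1 h2
  simp only [List.nil_append, List.getElem_map, List.getElem_range, List.getElem_reverse]
  have hlen : i < f.length := by simpa using h2
  rw [PySem.List.pyGetD_eq_getElem _ _ (by omega) (by omega)]
  congr 1
  omega

lemma pal2_stop (l : List Char) (lo hi : Int) (hle : ¬ lo < hi)
    (hsum : lo + hi = (l.length : Int) - 1) :
    pal2 l lo hi = true ↔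
      ∀ k : Int, lo ≤ k → k ≤ hi →
        PySem.List.pyGetD l k ' ' = PySem.List.pyGetD l ((l.length : Int) - 1 - k) ' ' := by
  rw [pal2, if_neg hle]
  constructor
  · intro _ k h1 h2
    have hk : (l.length : Int) - 1 - k = k := by omega
    rw [hk]
  · intro _; rfl

lemma pal2_true_iff (d : Nat) (l : List Char) (lo hi : Int)
    (hd : (hi - lo).toNat ≤ d) (h0 : 0 ≤ lo) (h1 : hi < l.length)
    (hsum : lo + hi = (l.length : Int) - 1) :
    pal2 l lo hi = true ↔
      ∀ k : Int, lo ≤ k → k ≤ hi →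
        PySem.List.pyGetD l k ' ' = PySem.List.pyGetD l ((l.length : Int) - 1 - k) ' ' := by
  induction d generalizing lo hi with
  | zero => exact pal2_stop l lo hi (by omega) hsum
  | succ d ih =>
    by_cases hlt : lo < hi
    · rw [pal2, if_pos hlt]
      by_cases heq : PySem.List.pyGetD l lo ' ' = PySem.List.pyGetD l hi ' '
      · rw [if_neg (by simpa using heq)]
        rw [ih (lo + 1) (hi - 1) (by omega) (by omega) (by omega) (by omega)]
        constructor
        · intro h k hk1 hk2
          by_cases hkl : k = lo
          · subst hkl
            rw [show (l.length : Int) - 1 - k = hi by omega]; exact heq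
          · by_cases hkh : k = hi
            · subst hkh
              rw [show (l.length : Int) - 1 - k = lo by omega]; exact heq.symm
            · exact h k (by omega) (by omega)
        · intro h k hk1 hk2; exact h k (by omega) (by omega)
      · rw [if_pos (by simpa using heq)]
        apply iff_of_false (by simp)
        intro h
        apply heq
        have := h lo (le_refl lo) (le_of_lt hlt)
        rwa [show (l.length : Int) - 1 - lo = hi by omega] at this
    · exact pal2_stop l lo hi hlt hsum

lemma palindrome_iff_mirror (l : List Char) :
    l = l.reverse ↔
      ∀ k : Int, 0 ≤ k → k ≤ (l.length : Int) - 1 →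
        PySem.List.pyGetD l k ' ' = PySem.List.pyGetD l ((l.length : Int) - 1 - k) ' ' := by
  constructor
  · intro hpal k hk1 hk2
    rw [PySem.List.pyGetD_eq_getElem _ _ hk1 (by omega),
        PySem.List.pyGetD_eq_getElem _ _ (by omega) (by omega)]
    have h1 : l[k.toNat]? = l.reverse[k.toNat]? := by rw [← hpal]
    rw [List.getElem?_reverse (by omega)] at h1
    rw [List.getElem?_eq_getElem (by omega), List.getElem?_eq_getElem (by omega)] at h1
    rw [Option.some.inj h1]
    congr 1
    omega
  · intro h
    apply List.ext_getElem (by simp)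
    intro i hi1 hi2
    rw [List.getElem_reverse]
    have hh := h i (by omega) (by omega)
    rw [PySem.List.pyGetD_eq_getElem _ _ (by omega) (by simpa using hi1),
        PySem.List.pyGetD_eq_getElem _ _ (by omega) (by omega)] at hh
    have h3 : ((i : Int)).toNat = i := by omega
    have h4 : (((l.length : Int)) - 1 - (i : Int)).toNat = l.length - 1 - i := by omega
    simp only [h3, h4] at hh
    exact hh

lemma pal2_eq_decide (l : List Char) :
    pal2 l 0 ((l.length : Int) - 1) = decide (l = l.reverse) := by
  have h := pal2_true_iff l.length l 0 ((l.length : Int) - 1)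
    (by omega) (by omega) (by omega) (by omega)
  by_cases hp : l = l.reverse
  · rw [h.mpr ((palindrome_iff_mirror l).mp hp)]
    exact (decide_eq_true hp).symm
  · rw [decide_eq_false hp, ← Bool.not_eq_true]
    intro ht
    exact hp ((palindrome_iff_mirror l).mpr (h.mp ht))

-- ===== VERDICT (by name: the statement is the Claim_ definition above) =====
theorem solution_spec : Claim_equal_solution := by
  intro s _
  unfold Spec_solution solution solution_alt
  dsimp only
  rw [filterA_eq, List.nil_append, revA_eq, pal2_eq_decide]
  split_ifs with h
  · exact (decide_eq_true h).symm
  · exact (decide_eq_false h).symm
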